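-- pv_equiv track=rewrite | github.com/belbaz/BD | Jointure/Jointure MongoDB/joiuntureMongoDB.py | jointure
-- ===== SOURCE A (Python) =====
-- def jointure(collection1, collection2, champ_comm):
--     result = []
--     for doc1 in collection1:
--         for doc2 in collection2:
--             if champ_comm in doc1 and champ_comm in doc2 and doc1[champ_comm] == doc2[champ_comm]:
--                 jointed_doc = {**doc1, **doc2}
--                 result.append(jointed_doc)
--     return result
-- ===== SOURCE B (Python) =====
-- def jointure(collection1, collection2, champ_comm):
--     # Hash join: index collection2 by its champ_comm value (order-preserving),
--     # then probe the index once per doc1.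
--     index = {}
--     for doc2 in collection2:
--         if champ_comm in doc2:
--             index.setdefault(doc2[champ_comm], []).append(doc2)
--     result = []
--     for doc1 in collection1:
--         if champ_comm in doc1:
--             for doc2 in index.get(doc1[champ_comm], []):
--                 result.append({**doc1, **doc2})
--     return result
-- ===== Notes on version B (the rewrite author's own statement) =====
-- stated objective: alternative
-- what changed: Replaced the nested-loop join (inner scan of collection2 per doc1) with a hash join: collection2 is indexed once by its champ_comm value into order-preserving lists, then each doc1 does a single dict probe; output order (doc1-major, collection2 order within a group) is identical.
import Mathlib
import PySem

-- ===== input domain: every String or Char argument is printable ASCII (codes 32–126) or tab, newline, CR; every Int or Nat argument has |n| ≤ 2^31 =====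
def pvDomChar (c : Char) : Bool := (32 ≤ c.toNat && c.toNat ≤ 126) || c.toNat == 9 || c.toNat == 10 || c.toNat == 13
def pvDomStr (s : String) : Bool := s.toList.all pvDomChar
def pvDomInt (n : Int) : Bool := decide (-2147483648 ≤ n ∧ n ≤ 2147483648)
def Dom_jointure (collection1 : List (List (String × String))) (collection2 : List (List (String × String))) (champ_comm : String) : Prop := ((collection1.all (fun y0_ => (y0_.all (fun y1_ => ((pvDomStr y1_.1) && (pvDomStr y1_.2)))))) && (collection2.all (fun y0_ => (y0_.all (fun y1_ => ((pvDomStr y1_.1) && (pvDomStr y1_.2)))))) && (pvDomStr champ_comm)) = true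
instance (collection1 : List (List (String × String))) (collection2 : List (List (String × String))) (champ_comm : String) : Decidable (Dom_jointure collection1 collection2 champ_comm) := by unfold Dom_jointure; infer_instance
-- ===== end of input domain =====

-- B replaces A's nested-loop join with a hash join (index collection2 by champ_comm value, order-preserving): a different algorithm with the same output.


def jmerge (doc1 doc2 : List (String × String)) : List (String × String) :=
  (((PySem.Dict.ofList doc1).update doc2)).items

-- ===== PORT A =====
def jointure (collection1 : List (List (String × String))) (collection2 : List (List (String × String))) (champ_comm : String) : List (List (String × String)) :=
  collection1.foldl (fun result doc1 =>
    collection2.foldl (fun result doc2 =>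
      if (PySem.Dict.ofList doc1).contains champ_comm && (PySem.Dict.ofList doc2).contains champ_comm &&
          ((PySem.Dict.ofList doc1).getD champ_comm "" == (PySem.Dict.ofList doc2).getD champ_comm "") then
        result ++ [jmerge doc1 doc2]
      else result) result) []

-- ===== PORT B =====
def jointure_alt (collection1 : List (List (String × String))) (collection2 : List (List (String × String))) (champ_comm : String) : List (List (String × String)) :=
  collection1.foldl (fun result doc1 =>
    match (PySem.Dict.ofList doc1).get? champ_comm with
    | some v => result ++ ((collection2.foldl (fun d doc2 =>
        match (PySem.Dict.ofList doc2).get? champ_comm with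
        | some v => d.modify v [] (· ++ [doc2])
        | none => d) PySem.Dict.empty).getD v []).map (fun doc2 => jmerge doc1 doc2)
    | none => result) []

-- ===== PRECONDITION & SPEC =====
def Spec_jointure (collection1 : List (List (String × String))) (collection2 : List (List (String × String))) (champ_comm : String) (out : List (List (String × String))) : Prop := out = jointure_alt collection1 collection2 champ_comm
instance (collection1 : List (List (String × String))) (collection2 : List (List (String × String))) (champ_comm : String) (out : List (List (String × String))) : Decidable (Spec_jointure collection1 collection2 champ_comm out) := by unfold Spec_jointure; infer_instance

-- ===== CLAIM (what is proved, stated in full; the proofs are below) =====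
def Claim_equal_jointure : Prop := ∀ (collection1 : List (List (String × String))) (collection2 : List (List (String × String))) (champ_comm : String), Dom_jointure collection1 collection2 champ_comm → Spec_jointure collection1 collection2 champ_comm (jointure collection1 collection2 champ_comm)

-- ===== LEMMAS AND PROOFS =====

-- the index-building loop of B, over any accumulator, is a modify-append loop over the keyed pairs
theorem idx_eq_keyed (k : String) (l : List (List (String × String)))
    (d : PySem.Dict String (List (List (String × String)))) :
    l.foldl (fun d doc2 =>
      match (PySem.Dict.ofList doc2).get? k with
      | some v => d.modify v [] (· ++ [doc2])
      | none => d) d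
    = (l.filterMap (fun doc2 => ((PySem.Dict.ofList doc2).get? k).map (fun v => (v, doc2)))).foldl
        (fun d p => d.modify p.1 [] (· ++ [p.2])) d := by
  induction l generalizing d with
  | nil => rfl
  | cons doc2 t ih =>
    simp only [List.foldl_cons, List.filterMap_cons]
    cases h : (PySem.Dict.ofList doc2).get? k with
    | none => simp [ih]
    | some v => simp [ih]

theorem keyed_filter (k v : String) (l : List (List (String × String))) :
    ((l.filterMap (fun doc2 => ((PySem.Dict.ofList doc2).get? k).map (fun v => (v, doc2)))).filter
        (fun p => p.1 == v)).map (·.2)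
    = l.filter (fun doc2 => (PySem.Dict.ofList doc2).get? k == some v) := by
  induction l with
  | nil => rfl
  | cons doc2 t ih =>
    simp only [List.filterMap_cons, List.filter_cons]
    cases h : (PySem.Dict.ofList doc2).get? k with
    | none => simpa [h] using ih
    | some v2 =>
      by_cases hv : v2 = v
      · subst hv; simp [ih]
      · simp [hv, ih]

-- what B's index returns for a probe value v: the matching docs of collection2 in order
theorem idx_getD (k v : String) (l : List (List (String × String))) :
    (l.foldl (fun d doc2 =>
      match (PySem.Dict.ofList doc2).get? k with
      | some v => d.modify v [] (· ++ [doc2])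
      | none => d) PySem.Dict.empty).getD v []
    = l.filter (fun doc2 => (PySem.Dict.ofList doc2).get? k == some v) := by
  rw [idx_eq_keyed, PySem.Dict.getD_foldl_modify_append]
  simpa using keyed_filter k v l

-- A's test, given doc1's value at the join key
theorem cond_eq (k v1 : String) (doc1 doc2 : List (String × String))
    (h1 : (PySem.Dict.ofList doc1).get? k = some v1) :
    ((PySem.Dict.ofList doc1).contains k && (PySem.Dict.ofList doc2).contains k &&
      ((PySem.Dict.ofList doc1).getD k "" == (PySem.Dict.ofList doc2).getD k ""))
    = ((PySem.Dict.ofList doc2).get? k == some v1) := by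
  have hc1 : (PySem.Dict.ofList doc1).contains k = true := by
    rw [PySem.Dict.contains_eq_isSome_get?, h1]; rfl
  have hg1 : (PySem.Dict.ofList doc1).getD k "" = v1 := by
    rw [PySem.Dict.getD_eq_get?_getD, h1]; rfl
  cases h2 : (PySem.Dict.ofList doc2).get? k with
  | none =>
    have hc2 : (PySem.Dict.ofList doc2).contains k = false := by
      rw [PySem.Dict.contains_eq_isSome_get?, h2]; rfl
    simp [hc1, hc2]
  | some v2 =>
    have hc2 : (PySem.Dict.ofList doc2).contains k = true := by
      rw [PySem.Dict.contains_eq_isSome_get?, h2]; rfl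
    have hg2 : (PySem.Dict.ofList doc2).getD k "" = v2 := by
      rw [PySem.Dict.getD_eq_get?_getD, h2]; rfl
    simp [hc1, hc2, hg1, hg2, BEq.comm]

-- A's inner loop over collection2, for one doc1, as a filter-map
theorem innerA (k : String) (doc1 : List (String × String))
    (l : List (List (String × String))) (res : List (List (String × String))) :
    l.foldl (fun result doc2 =>
      if (PySem.Dict.ofList doc1).contains k && (PySem.Dict.ofList doc2).contains k &&
          ((PySem.Dict.ofList doc1).getD k "" == (PySem.Dict.ofList doc2).getD k "") then
        result ++ [jmerge doc1 doc2]
      else result) res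
    = (match (PySem.Dict.ofList doc1).get? k with
      | some v => res ++ ((l.filter (fun doc2 => (PySem.Dict.ofList doc2).get? k == some v)).map
          (fun doc2 => jmerge doc1 doc2))
      | none => res) := by
  cases h1 : (PySem.Dict.ofList doc1).get? k with
  | none =>
    have hc1 : (PySem.Dict.ofList doc1).contains k = false := by
      rw [PySem.Dict.contains_eq_isSome_get?, h1]; rfl
    have hf : (fun (result : List (List (String × String))) doc2 =>
        if (PySem.Dict.ofList doc1).contains k && (PySem.Dict.ofList doc2).contains k &&
            ((PySem.Dict.ofList doc1).getD k "" == (PySem.Dict.ofList doc2).getD k "") then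
          result ++ [jmerge doc1 doc2]
        else result)
        = fun (result : List (List (String × String))) _ => result := by
      funext r d2; simp [hc1]
    rw [hf, PySem.List.foldl_ignore]
  | some v =>
    have hf : (fun (result : List (List (String × String))) doc2 =>
        if (PySem.Dict.ofList doc1).contains k && (PySem.Dict.ofList doc2).contains k &&
            ((PySem.Dict.ofList doc1).getD k "" == (PySem.Dict.ofList doc2).getD k "") then
          result ++ [jmerge doc1 doc2]
        else result)
        = fun (result : List (List (String × String))) doc2 =>
            if (PySem.Dict.ofList doc2).get? k == some v then result ++ [jmerge doc1 doc2]
            else result := by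
      funext r d2; rw [cond_eq k v doc1 d2 h1]
    rw [hf, PySem.List.foldl_append_if]

theorem jointure_eq_alt (c1 c2 : List (List (String × String))) (k : String) :
    jointure c1 c2 k = jointure_alt c1 c2 k := by
  unfold jointure jointure_alt
  induction c1 using List.reverseRecOn with
  | nil => rfl
  | append_singleton t doc1 ih =>
    simp only [List.foldl_append, List.foldl_cons, List.foldl_nil]
    rw [ih, innerA]
    cases h1 : (PySem.Dict.ofList doc1).get? k with
    | none => rfl
    | some v => simp only [idx_getD]

-- ===== VERDICT (by name: the statement is the Claim_ definition above) =====
theorem jointure_spec : Claim_equal_jointure := by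
  intro c1 c2 k _
  exact jointure_eq_alt c1 c2 k
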